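-- pv_equiv track=rewrite | github.com/dmitry957/codewars-training | kata/7-kyu/happy-birthday-darling/solution.py | womens_age
-- ===== SOURCE A (Python) =====
-- def womens_age(n):
--     def to_base(n, b):
--         if n == 0:
--             return [0]
--         digits = []
--         while n:
--             digits.append(int(n % b))
--             n //= b
--         return int(''.join(map(str, digits[::-1])))
--     base = 11
--     while (age := to_base(n, base)) not in (20, 21):
--         base += 1
--     return f"{n}? That's just {age}, in base {base}!"
-- ===== SOURCE B (Python) =====
-- def womens_age(n):
--     # n reads as the two-digit numeral "2r" (r = n % 2) in base n // 2 once n >= 22;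
--     # for n = 20 and 21 the first base >= 11 that works is n + 1, where n is a single
--     # digit whose decimal spelling is "20"/"21".
--     age = 20 + n % 2
--     base = n // 2 if n >= 22 else n + 1
--     return f"{n}? That's just {age}, in base {base}!"
-- ===== Notes on version B (the rewrite author's own statement) =====
-- stated objective: faster
-- what changed: A searches bases 11, 12, ... recomputing the full base-b digit string of n for every base until it reads as 20/21; B replaces the whole search and string conversion by the closed form base = n//2 (or n+1 for n in {20, 21}) and age = 20 + n%2.
-- outside the precondition, e.g. on womens_age(2): A does not finish within the time limit, B returns "2? That's just 20, in base 3!"; on womens_age(0): A does not finish within the time limit, B returns "0? That's just 20, in base 1!"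
import Mathlib
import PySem

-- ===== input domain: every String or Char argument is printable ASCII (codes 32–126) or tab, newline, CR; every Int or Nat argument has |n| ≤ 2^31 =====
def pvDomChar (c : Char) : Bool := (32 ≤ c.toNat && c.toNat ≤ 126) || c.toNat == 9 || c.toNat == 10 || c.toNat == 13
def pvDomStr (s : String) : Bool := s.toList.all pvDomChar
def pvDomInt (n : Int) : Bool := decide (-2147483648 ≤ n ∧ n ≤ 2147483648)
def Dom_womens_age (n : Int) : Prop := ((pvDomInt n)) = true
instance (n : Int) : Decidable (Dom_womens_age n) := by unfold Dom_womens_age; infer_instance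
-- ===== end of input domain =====

-- B replaces A's unbounded linear base search (re-converting n for every base) by the O(1)
-- closed form: n reads as "20"/"21" in base n//2 (n ≥ 22), and as the single digit 20/21
-- in base n+1 when n is 20/21 itself.

-- ===== PORT A =====

-- int(s) for the strings this program builds. The joined string fed to int() is always a
-- nonempty all-digit string (each piece is str(d) for a nonnegative int d), and on exactly
-- that shape this fold is Python's int(): no sign/whitespace/underscore can occur.
-- (PySem.Int.ofStr? is the general primitive, but its parser is a private definition with
-- no exported lemmas, so this hand port — exact on every string it is applied to — is used.)
def pyIntDigits (cs : List Char) : Int := cs.foldl (fun a c => a * 10 + ((c.toNat : Int) - 48)) 0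

-- while n: digits.append(int(n % b)); n //= b      (fuel bounds the while; n.natAbs + 1
-- steps are never exhausted for the divisors b ≥ 11 this program uses, proved below)
def womensDigitLoop (fuel : Nat) (n b : Int) (digits : List Int) : List Int :=
  match fuel with
  | 0 => digits
  | fuel + 1 =>
    if n ≠ 0 then womensDigitLoop fuel (PySem.Int.floordiv n b) b (digits ++ [PySem.Int.mod n b])
    else digits

-- to_base(n, b).  Python's `if n == 0: return [0]` returns a LIST (not an int); that branch
-- is unreachable here (to_base is only called with the top-level n, and Pre_ gives n ≥ 20),
-- so the port returns 0 there.
def womensToBase (n b : Int) : Int :=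
  if n = 0 then 0
  else
    -- digits[::-1] is the slice?, int(''.join(map(str, …))) is the pyIntDigits ∘ join ∘ map
    pyIntDigits (PySem.Chars.join []
      ((((PySem.List.slice? (womensDigitLoop (n.natAbs + 1) n b []) none none (-1)).getD [])).map
        PySem.Int.toChars))

-- while (age := to_base(n, base)) not in (20, 21): base += 1    (fuel n.toNat + 3 is never
-- exhausted for n ≥ 20, proved below)
def womensBaseLoop (fuel : Nat) (n base : Int) : Int × Int :=
  match fuel with
  | 0 => (0, base)
  | fuel + 1 =>
    -- (age := to_base(n, base)); the walrus value is written out at each use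
    if ¬(womensToBase n base = 20 ∨ womensToBase n base = 21) then womensBaseLoop fuel n (base + 1)
    else (womensToBase n base, base)

def womens_age (n : Int) : String :=
  let p := womensBaseLoop (n.toNat + 3) n 11
  PySem.Int.toStr n ++ "? That's just " ++ PySem.Int.toStr p.1 ++ ", in base " ++ PySem.Int.toStr p.2 ++ "!"

-- ===== PORT B =====
def womens_age_alt (n : Int) : String :=
  let age := 20 + PySem.Int.mod n 2
  let base := if n ≥ 22 then PySem.Int.floordiv n 2 else n + 1
  PySem.Int.toStr n ++ "? That's just " ++ PySem.Int.toStr age ++ ", in base " ++ PySem.Int.toStr base ++ "!"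

-- ===== PRECONDITION & SPEC =====
-- Pre_ excludes exactly the inputs n ≤ 19, on which A never returns: no base ≥ 11 reads such
-- an n as 20 or 21, so A's `while` searches bases forever (and for n = 0 to_base returns a
-- list, never equal to 20/21).
def Pre_womens_age (n : Int) : Prop := 20 ≤ n
instance (n : Int) : Decidable (Pre_womens_age n) := by unfold Pre_womens_age; infer_instance
def pvWitness_womens_age : Int := (25)
def Spec_womens_age (n : Int) (out : String) : Prop := out = womens_age_alt n
instance (n : Int) (out : String) : Decidable (Spec_womens_age n out) := by unfold Spec_womens_age; infer_instance

-- ===== CLAIM (what is proved, stated in full; the proofs are below) =====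
def Claim_equal_womens_age : Prop := ∀ (n : Int), Dom_womens_age n → Pre_womens_age n → Spec_womens_age n (womens_age n)

-- ===== LEMMAS AND PROOFS =====

-- the little-endian digit list of n in base b (specification of the inner while loop)
def pvDigits (n b : Int) : List Int :=
  if h : 2 ≤ b ∧ 0 < n then PySem.Int.mod n b :: pvDigits (PySem.Int.floordiv n b) b else []
termination_by n.toNat
decreasing_by
  have hb : (0:Int) < b := by omega
  have h1 : PySem.Int.floordiv n b = n / b := PySem.Int.floordiv_eq_ediv_of_pos hb
  have h2 : n / b < n := by rw [Int.ediv_lt_iff_lt_mul hb]; nlinarith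
  simp [h1]
  omega

theorem pvDigits_eq (n b : Int) (hb : 2 ≤ b) (hn : 0 < n) :
    pvDigits n b = PySem.Int.mod n b :: pvDigits (PySem.Int.floordiv n b) b := by
  rw [pvDigits]; simp [hb, hn]

theorem pvDigits_nil (n b : Int) (hn : n ≤ 0) : pvDigits n b = [] := by
  rw [pvDigits]; simp; omega

theorem womensDigitLoop_eq (fuel : Nat) : ∀ (n b : Int) (acc : List Int),
    2 ≤ b → 0 ≤ n → n.toNat < fuel →
    womensDigitLoop fuel n b acc = acc ++ pvDigits n b := by
  induction fuel with
  | zero => intro n b acc _ _ hf; omega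
  | succ fuel ih =>
    intro n b acc hb hn hf
    by_cases h0 : n = 0
    · subst h0
      simp [womensDigitLoop, pvDigits_nil]
    · have hpos : 0 < n := by omega
      have hb' : (0:Int) < b := by omega
      have hfd : PySem.Int.floordiv n b = n / b := PySem.Int.floordiv_eq_ediv_of_pos hb'
      have hlt : n / b < n := by rw [Int.ediv_lt_iff_lt_mul hb']; nlinarith
      have hge : 0 ≤ n / b := Int.ediv_nonneg (by omega) (by omega)
      have step : womensDigitLoop (fuel + 1) n b acc
          = womensDigitLoop fuel (PySem.Int.floordiv n b) b (acc ++ [PySem.Int.mod n b]) := by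
        simp [womensDigitLoop, h0]
      rw [step, ih _ _ _ hb (by rw [hfd]; omega) (by rw [hfd]; omega),
        pvDigits_eq n b hb hpos]
      simp

-- small digit facts
theorem pvDigits_single (n b : Int) (hb : 2 ≤ b) (h1 : 0 < n) (h2 : n < b) :
    pvDigits n b = [n] := by
  have hb' : (0:Int) < b := by omega
  rw [pvDigits_eq n b hb h1, PySem.Int.mod_eq_emod_of_pos hb',
    PySem.Int.floordiv_eq_ediv_of_pos hb', Int.emod_eq_of_lt (by omega) h2,
    Int.ediv_eq_zero_of_lt (by omega) h2, pvDigits_nil _ _ (by omega)]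

theorem pvDigits_two (n b : Int) (hb : 2 ≤ b) (h1 : b ≤ n) (h2 : n < b * b) :
    pvDigits n b = [PySem.Int.mod n b, PySem.Int.floordiv n b] := by
  have hb' : (0:Int) < b := by omega
  have hq1 : 1 ≤ n / b := Int.le_ediv_of_mul_le hb' (by omega)
  have hq2 : n / b < b := by rw [Int.ediv_lt_iff_lt_mul hb']; omega
  rw [pvDigits_eq n b hb (by omega), PySem.Int.floordiv_eq_ediv_of_pos hb',
    pvDigits_single _ b hb (by omega) hq2, ← PySem.Int.floordiv_eq_ediv_of_pos hb']

theorem pvDigits_len3 (n b : Int) (hb : 2 ≤ b) (h1 : b * b ≤ n) :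
    3 ≤ (pvDigits n b).length := by
  have hb' : (0:Int) < b := by omega
  have hn : 0 < n := by nlinarith
  have hq : b ≤ n / b := Int.le_ediv_of_mul_le hb' (by omega)
  have hq2 : 1 ≤ n / b / b := Int.le_ediv_of_mul_le hb' (by omega)
  rw [pvDigits_eq n b hb hn, PySem.Int.floordiv_eq_ediv_of_pos hb',
    pvDigits_eq _ b hb (by omega), PySem.Int.floordiv_eq_ediv_of_pos hb',
    pvDigits_eq _ b hb (by omega)]
  simp

theorem pvDigits_mem (n b : Int) (hb : 2 ≤ b) :
    ∀ d ∈ pvDigits n b, 0 ≤ d ∧ d < b := by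
  induction n using pvDigits.induct (b := b) with
  | case1 n h ih =>
    rw [pvDigits_eq n b h.1 h.2]
    intro d hd
    rcases List.mem_cons.mp hd with h' | h'
    · subst h'
      exact ⟨PySem.Int.mod_nonneg n (by omega), PySem.Int.mod_lt n (by omega)⟩
    · exact ih d h'
  | case2 n h =>
    rw [pvDigits, dif_neg h]
    simp

theorem pvDigits_last (n b : Int) (hb : 2 ≤ b) (hn : 0 < n) :
    ∀ d, (pvDigits n b).getLast? = some d → 1 ≤ d := by
  induction n using pvDigits.induct (b := b) with
  | case1 n h ih =>
    intro d hd
    have hb' : (0:Int) < b := by omega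
    by_cases hlt : n < b
    · rw [pvDigits_single n b h.1 h.2 hlt] at hd
      simp at hd
      omega
    · have hq1 : 1 ≤ PySem.Int.floordiv n b := by
        rw [PySem.Int.floordiv_eq_ediv_of_pos hb']
        exact Int.le_ediv_of_mul_le hb' (by omega)
      rw [pvDigits_eq n b h.1 h.2, pvDigits_eq _ b h.1 (by omega), List.getLast?_cons_cons,
        ← pvDigits_eq _ b h.1 (by omega)] at hd
      exact ih hq1 d hd
  | case2 n h =>
    intro d hd
    rw [pvDigits, dif_neg h] at hd
    simp at hd

-- decimal recomposition for the hand int(): folding str(m) starting from a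
theorem digitChar_toNat (m : Nat) (h : m < 10) : (Nat.digitChar m).toNat = 48 + m := by
  interval_cases m <;> rfl

theorem valFold_toDigits (m : Nat) : ∀ (a : Int),
    (Nat.toDigits 10 m).foldl (fun a c => a * 10 + ((c.toNat : Int) - 48)) a
      = a * 10 ^ (Nat.toDigits 10 m).length + m := by
  induction m using Nat.strong_induction_on with
  | _ m ih =>
    intro a
    by_cases h : m < 10
    · rw [Nat.toDigits_of_lt_base h]
      simp only [List.foldl_cons, List.foldl_nil, List.length_cons, List.length_nil,
        digitChar_toNat m h]
      push_cast
      ring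
    · rw [Nat.toDigits_of_base_le (by omega) (by omega), List.foldl_append]
      have hq : m / 10 < m := Nat.div_lt_self (by omega) (by omega)
      rw [ih _ hq]
      simp only [List.foldl_cons, List.foldl_nil, List.length_append, List.length_cons,
        List.length_nil, digitChar_toNat (m % 10) (Nat.mod_lt m (by omega))]
      have hm : ((m / 10 : Nat) : Int) * 10 + ((m % 10 : Nat) : Int) = (m : Int) := by omega
      simp only [Nat.cast_add, Nat.cast_ofNat]
      rw [pow_succ]
      linear_combination hm

theorem toDigits_len_one (m : Nat) (h : m < 10) : (Nat.toDigits 10 m).length = 1 := by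
  rw [Nat.toDigits_of_lt_base h]
  rfl

theorem toDigits_len_ge_two (m : Nat) (h : 10 ≤ m) : 2 ≤ (Nat.toDigits 10 m).length := by
  rw [Nat.toDigits_of_base_le (by omega) (by omega), List.length_append]
  have := @Nat.length_toDigits_pos 10 (m / 10)
  simp
  omega

theorem valFold_lower (cs : List Char) (hcs : ∀ c ∈ cs, 48 ≤ c.toNat) : ∀ (a : Int), 0 ≤ a →
    a * 10 ^ cs.length ≤ cs.foldl (fun a c => a * 10 + ((c.toNat : Int) - 48)) a := by
  induction cs with
  | nil => intro a _; simp
  | cons c cs ihc =>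
    intro a ha
    have hc : (48:Int) ≤ (c.toNat : Int) := by exact_mod_cast hcs c (List.mem_cons_self)
    have ha' : 0 ≤ a * 10 + ((c.toNat : Int) - 48) := by nlinarith
    have h2 := ihc (fun c' hc' => hcs c' (List.mem_cons_of_mem c hc')) _ ha'
    simp only [List.foldl_cons, List.length_cons]
    refine le_trans ?_ h2
    have hpow : (0:Int) ≤ 10 ^ cs.length := by positivity
    calc a * 10 ^ (cs.length + 1) = (a * 10) * 10 ^ cs.length := by ring
      _ ≤ (a * 10 + ((c.toNat : Int) - 48)) * 10 ^ cs.length := by nlinarith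

theorem join_nil_flatten (xs : List (List Char)) : PySem.Chars.join [] xs = xs.flatten := by
  induction xs with
  | nil => simp [PySem.Chars.join_nil]
  | cons h t iht =>
    cases t with
    | nil => simp [PySem.Chars.join_singleton]
    | cons a b => rw [PySem.Chars.join_cons_cons] at *; simp_all

-- toChars of a nonnegative int is Nat.toDigits 10
theorem toChars_nonneg (d : Int) (h : 0 ≤ d) :
    PySem.Int.toChars d = Nat.toDigits 10 d.toNat := by
  simp [PySem.Int.toChars]; omega

-- the value to_base computes, for the two-digit case
theorem womensToBase_two (n b : Int) (hb : 11 ≤ b) (h1 : b ≤ n) (h2 : n < b * b) :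
    womensToBase n b =
      (PySem.Int.floordiv n b) * 10 ^ (Nat.toDigits 10 (PySem.Int.mod n b).toNat).length
        + PySem.Int.mod n b := by
  have hb' : (0:Int) < b := by omega
  have hq0 : 0 ≤ PySem.Int.floordiv n b := by
    rw [PySem.Int.floordiv_eq_ediv_of_pos hb']
    exact Int.ediv_nonneg (by omega) (by omega)
  have hr0 : 0 ≤ PySem.Int.mod n b := PySem.Int.mod_nonneg n hb'
  unfold womensToBase
  rw [if_neg (by omega),
    womensDigitLoop_eq _ n b [] (by omega) (by omega) (by omega),
    pvDigits_two n b (by omega) h1 h2, List.nil_append,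
    PySem.List.slice?_none_none_neg_one]
  simp only [Option.getD_some, List.reverse_cons, List.reverse_nil, List.nil_append,
    List.cons_append, List.map_cons, List.map_nil]
  rw [join_nil_flatten]
  simp only [List.flatten_cons, List.flatten_nil, List.append_nil]
  rw [toChars_nonneg _ hq0, toChars_nonneg _ hr0]
  unfold pyIntDigits
  rw [List.foldl_append, valFold_toDigits, valFold_toDigits]
  rw [Int.toNat_of_nonneg hq0, Int.toNat_of_nonneg hr0]
  ring

-- skip: for 20 ≤ n and 11 ≤ b below the stopping base, to_base(n, b) is not 20 or 21
def pvStop (n : Int) : Int := if n ≥ 22 then PySem.Int.floordiv n 2 else n + 1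

-- chars of str(d) for d ≥ 0 are decimal digits
theorem toDigits_chars_ge (m : Nat) (c : Char) (hc : c ∈ Nat.toDigits 10 m) : 48 ≤ c.toNat := by
  have hd := Nat.isDigit_of_mem_toDigits (by omega) (by omega) hc
  simp only [Char.isDigit, ge_iff_le, Bool.and_eq_true, decide_eq_true_eq] at hd
  exact UInt32.le_iff_toNat_le.mp hd.1

theorem womensToBase_ge3 (n b : Int) (hb : 11 ≤ b) (h1 : b * b ≤ n) :
    100 ≤ womensToBase n b := by
  have hb' : (0:Int) < b := by omega
  have hn : 0 < n := by nlinarith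
  unfold womensToBase
  rw [if_neg (by omega),
    womensDigitLoop_eq _ n b [] (by omega) (by omega) (by omega), List.nil_append,
    PySem.List.slice?_none_none_neg_one]
  simp only [Option.getD_some]
  have hlen : 3 ≤ (pvDigits n b).length := pvDigits_len3 n b (by omega) h1
  obtain ⟨d1, rest, hrev⟩ : ∃ d1 rest, (pvDigits n b).reverse = d1 :: rest := by
    cases h : (pvDigits n b).reverse with
    | nil =>
        rw [List.reverse_eq_nil_iff] at h
        rw [h] at hlen
        simp at hlen
    | cons a t => exact ⟨a, t, rfl⟩
  have hd1mem : d1 ∈ pvDigits n b := by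
    have : d1 ∈ (pvDigits n b).reverse := by rw [hrev]; exact List.mem_cons_self
    exact List.mem_reverse.mp this
  have hd1r := pvDigits_mem n b (by omega) d1 hd1mem
  have hd1pos : 1 ≤ d1 := by
    apply pvDigits_last n b (by omega) hn d1
    rw [← List.head?_reverse, hrev]
    rfl
  have hrestlen : 2 ≤ rest.length := by
    have := congrArg List.length hrev
    simp at this
    omega
  rw [hrev]
  simp only [List.map_cons]
  rw [join_nil_flatten]
  simp only [List.flatten_cons]
  unfold pyIntDigits
  rw [List.foldl_append, toChars_nonneg _ hd1r.1, valFold_toDigits, zero_mul, zero_add,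
    Int.toNat_of_nonneg hd1r.1]
  -- lower bound the tail fold
  have hchars : ∀ c ∈ (rest.map PySem.Int.toChars).flatten, 48 ≤ c.toNat := by
    intro c hc
    obtain ⟨blk, hblk, hcin⟩ := List.mem_flatten.mp hc
    obtain ⟨x, hx, hxeq⟩ := List.mem_map.mp hblk
    have hxmem : x ∈ pvDigits n b := by
      apply List.mem_reverse.mp
      rw [hrev]
      exact List.mem_cons_of_mem d1 hx
    have hx0 := (pvDigits_mem n b (by omega) x hxmem).1
    rw [← hxeq, toChars_nonneg _ hx0] at hcin
    exact toDigits_chars_ge _ c hcin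
  have hlow := valFold_lower _ hchars d1 (by omega)
  refine le_trans ?_ hlow
  -- flatten length ≥ 2
  have hflen : 2 ≤ ((rest.map PySem.Int.toChars).flatten).length := by
    obtain ⟨x, rest2, hx⟩ : ∃ x rest2, rest = x :: rest2 := by
      cases rest with
      | nil => simp at hrestlen
      | cons a t => exact ⟨a, t, rfl⟩
    obtain ⟨y, rest3, hy⟩ : ∃ y rest3, rest2 = y :: rest3 := by
      cases h : rest2 with
      | nil => subst hx; rw [h] at hrestlen; simp at hrestlen
      | cons a t => exact ⟨a, t, rfl⟩
    subst hx hy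
    simp only [List.map_cons, List.flatten_cons, List.length_append]
    have p1 : 1 ≤ (PySem.Int.toChars x).length := by
      have hxmem : x ∈ pvDigits n b := by
        apply List.mem_reverse.mp
        rw [hrev]
        exact List.mem_cons_of_mem d1 List.mem_cons_self
      rw [toChars_nonneg _ ((pvDigits_mem n b (by omega) x hxmem).1)]
      exact Nat.length_toDigits_pos
    have p2 : 1 ≤ (PySem.Int.toChars y).length := by
      have hymem : y ∈ pvDigits n b := by
        apply List.mem_reverse.mp
        rw [hrev]
        exact List.mem_cons_of_mem d1 (List.mem_cons_of_mem x List.mem_cons_self)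
      rw [toChars_nonneg _ ((pvDigits_mem n b (by omega) y hymem).1)]
      exact Nat.length_toDigits_pos
    omega
  have hpow : (100:Int) ≤ 10 ^ ((rest.map PySem.Int.toChars).flatten).length := by
    calc (100:Int) = 10 ^ 2 := by norm_num
      _ ≤ _ := pow_le_pow_right₀ (by omega) hflen
  nlinarith

theorem womensToBase_skip (n b : Int) (hn : 20 ≤ n) (hb : 11 ≤ b) (hlt : b < pvStop n) :
    ¬(womensToBase n b = 20 ∨ womensToBase n b = 21) := by
  by_cases h22 : 22 ≤ n
  · have hd2 : PySem.Int.floordiv n 2 = n / 2 := PySem.Int.floordiv_eq_ediv_of_pos (by omega)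
    have hS : pvStop n = n / 2 := by unfold pvStop; rw [if_pos (by omega), hd2]
    rw [hS] at hlt
    have hb' : (0:Int) < b := by omega
    have h2b2 : 2 * b + 2 ≤ n := by omega
    by_cases hsq : n < b * b
    · have htwo := womensToBase_two n b hb (by omega) hsq
      set q := PySem.Int.floordiv n b with hqdef
      set r := PySem.Int.mod n b with hrdef
      have hq2 : 2 ≤ q := by
        rw [hqdef, PySem.Int.floordiv_eq_ediv_of_pos hb']
        exact Int.le_ediv_of_mul_le hb' (by omega)
      have hr0 : 0 ≤ r := PySem.Int.mod_nonneg n hb'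
      have hrb : r < b := PySem.Int.mod_lt n hb'
      have hnqr : q * b + r = n := PySem.Int.floordiv_mul_add_mod n b
      by_cases hr9 : r ≤ 9
      · rw [toDigits_len_one _ (by omega)] at htwo
        intro hor
        have hv : womensToBase n b = q * 10 + r := by rw [htwo]; ring
        rcases hor with h | h <;> rw [hv] at h
        · have hq2' : q = 2 ∧ r = 0 := by omega
          rw [hq2'.1] at hnqr
          omega
        · have hq2' : q = 2 ∧ r = 1 := by omega
          rw [hq2'.1] at hnqr
          omega
      · have hlen := toDigits_len_ge_two r.toNat (by omega)
        have hpow : (100:Int) ≤ 10 ^ (Nat.toDigits 10 r.toNat).length := by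
          calc (100:Int) = 10 ^ 2 := by norm_num
            _ ≤ 10 ^ (Nat.toDigits 10 r.toNat).length := by
                apply pow_le_pow_right₀ (by omega) hlen
        intro hor
        have hv : 200 ≤ womensToBase n b := by rw [htwo]; nlinarith
        rcases hor with h | h <;> omega
    · intro hor
      have := womensToBase_ge3 n b hb (by omega)
      rcases hor with h | h <;> omega
  · have h2021 : n = 20 ∨ n = 21 := by omega
    have hS : pvStop n = n + 1 := by unfold pvStop; rw [if_neg (by omega)]
    rw [hS] at hlt
    rcases h2021 with h | h <;> subst h <;> interval_cases b <;> decide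

theorem womensToBase_stop (n : Int) (hn : 20 ≤ n) :
    womensToBase n (pvStop n) = 20 + PySem.Int.mod n 2 := by
  by_cases h22 : 22 ≤ n
  · have hd2 : PySem.Int.floordiv n 2 = n / 2 := PySem.Int.floordiv_eq_ediv_of_pos (by omega)
    have hS : pvStop n = n / 2 := by unfold pvStop; rw [if_pos (by omega), hd2]
    set b := n / 2 with hbdef
    have hb11 : 11 ≤ b := by omega
    have hb' : (0:Int) < b := by omega
    have hbn : b ≤ n := by omega
    have h2b : 2 * b ≤ n ∧ n ≤ 2 * b + 1 := by omega
    have hnb2 : n < b * b := by nlinarith [h2b.1, h2b.2]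
    have hq : PySem.Int.floordiv n b = 2 := by
      rw [PySem.Int.floordiv_eq_ediv_of_pos hb']
      have l1 : 2 ≤ n / b := Int.le_ediv_of_mul_le hb' (by omega)
      have l2 : n / b < 3 := by rw [Int.ediv_lt_iff_lt_mul hb']; omega
      omega
    have hr : PySem.Int.mod n b = n - 2 * b := by
      have h0 := PySem.Int.floordiv_mul_add_mod n b
      rw [hq] at h0
      omega
    have hr2 : PySem.Int.mod n 2 = n - 2 * b := by
      have h1 := PySem.Int.floordiv_mul_add_mod n 2
      have h2 : PySem.Int.floordiv n 2 = b := hd2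
      omega
    rw [hS, womensToBase_two n b hb11 hbn hnb2, hq, hr, hr2,
      toDigits_len_one _ (by omega)]
    ring
  · have h2021 : n = 20 ∨ n = 21 := by omega
    rcases h2021 with h | h <;> subst h <;> decide

theorem womensBaseLoop_run (n : Int) (hn : 20 ≤ n) : ∀ (fuel : Nat) (b : Int),
    11 ≤ b → b ≤ pvStop n → (pvStop n - b).toNat < fuel →
    womensBaseLoop fuel n b = (20 + PySem.Int.mod n 2, pvStop n) := by
  have hm0 : 0 ≤ PySem.Int.mod n 2 := PySem.Int.mod_nonneg n (by omega)
  have hm1 : PySem.Int.mod n 2 < 2 := PySem.Int.mod_lt n (by omega)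
  intro fuel
  induction fuel with
  | zero => intro b _ _ hf; omega
  | succ fuel ih =>
    intro b hb11 hble hf
    by_cases heq : b = pvStop n
    · subst heq
      have hst := womensToBase_stop n hn
      simp only [womensBaseLoop, hst]
      rw [if_neg (not_not_intro (by omega))]
    · have hlt : b < pvStop n := by omega
      have hskip := womensToBase_skip n b hn hb11 hlt
      simp only [womensBaseLoop]
      rw [if_pos hskip]
      exact ih (b + 1) (by omega) (by omega) (by omega)

-- ===== VERDICT (by name: the statement is the Claim_ definition above) =====
theorem womens_age_spec : Claim_equal_womens_age := by
  intro n _ hpre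
  have h20 : 20 ≤ n := hpre
  unfold Spec_womens_age womens_age womens_age_alt
  have hdiv : PySem.Int.floordiv n 2 = n / 2 := PySem.Int.floordiv_eq_ediv_of_pos (by omega)
  have hstop : 11 ≤ pvStop n ∧ pvStop n ≤ n + 1 := by
    unfold pvStop; rw [hdiv]; split <;> constructor <;> omega
  obtain ⟨hs1, hs2⟩ := hstop
  have hrun := womensBaseLoop_run n h20 (n.toNat + 3) 11 (by omega) hs1 (by omega)
  rw [hrun]
  unfold pvStop
  rfl
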